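-- pv_equiv track=rewrite | github.com/vjelic/nccl-rccl-parser-glog-fork | define_search_space.py | procesResults
-- ===== SOURCE A (Python) =====
-- def procesResults(minCom_group_step1, minCom_group_step2, degree_2):
--     results_step1, results_step2 = [], []
--     for i in range(len(minCom_group_step1)):
--         subgroup = []
--         for j in range(len(minCom_group_step1[i])):
--             subgroup.append(ord(minCom_group_step1[i][j]) - ord('a'))
--         results_step1.append(subgroup)
--
--     subgroup = []
--     for i in range(len(minCom_group_step2)):
--         subgroup.append(ord(minCom_group_step2[i]) - ord('0'))
--         if i % degree_2 == degree_2 - 1: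
--             results_step2.append(subgroup)
--             subgroup = []
--     return results_step1, results_step2
-- ===== SOURCE B (Python) =====
-- def procesResults(minCom_group_step1, minCom_group_step2, degree_2):
--     results_step1 = [[ord(c) - ord('a') for c in group] for group in minCom_group_step1]
--     ints = [ord(c) - ord('0') for c in minCom_group_step2]
--     n = len(ints) // degree_2
--     results_step2 = [ints[k * degree_2:(k + 1) * degree_2] for k in range(n)]
--     return results_step1, results_step2
-- ===== Notes on version B (the rewrite author's own statement) =====
-- stated objective: idiomatic
-- what changed: Step 1 becomes a nested comprehension and step 2 is rebuilt by computing the number of complete chunks len//degree_2 and slicing each chunk out, replacing A's per-element accumulator with a modulo test; the trailing incomplete chunk is dropped by construction.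
-- outside the precondition, e.g. on procesResults([], '', 0): A returns ([], []), B raises ZeroDivisionError
import Mathlib
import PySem

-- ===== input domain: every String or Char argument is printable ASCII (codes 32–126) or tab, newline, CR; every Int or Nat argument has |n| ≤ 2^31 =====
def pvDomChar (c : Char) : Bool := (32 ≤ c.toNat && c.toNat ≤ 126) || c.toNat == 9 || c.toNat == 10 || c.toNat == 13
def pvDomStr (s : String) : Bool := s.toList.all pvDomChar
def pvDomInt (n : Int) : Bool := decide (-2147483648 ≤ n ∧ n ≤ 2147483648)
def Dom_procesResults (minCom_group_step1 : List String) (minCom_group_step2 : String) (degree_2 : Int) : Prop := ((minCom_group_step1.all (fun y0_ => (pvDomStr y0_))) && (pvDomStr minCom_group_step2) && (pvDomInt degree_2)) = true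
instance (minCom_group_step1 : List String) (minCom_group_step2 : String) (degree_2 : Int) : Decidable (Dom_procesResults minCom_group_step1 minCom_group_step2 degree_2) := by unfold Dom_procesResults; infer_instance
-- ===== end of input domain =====

-- B builds step 2 by slicing whole chunks (len//degree_2 of them) instead of A's per-element modulo accumulator (objective: idiomatic; same cost).

-- ===== PORT A =====
-- A-side helper: the body of A's second loop (one iteration; state = (results_step2, subgroup)).
def pvStep2A (d : Int) (st : List (List Int) × List Int) (ci : Char × Nat) : List (List Int) × List Int :=
  let sub := st.2 ++ [((ci.1.toNat : Int) - 48)]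
  if PySem.Int.mod ((ci.2 : Nat) : Int) d = d - 1 then (st.1 ++ [sub], []) else (st.1, sub)

def procesResults (minCom_group_step1 : List String) (minCom_group_step2 : String) (degree_2 : Int) : List (List Int) × List (List Int) :=
  let results_step1 := minCom_group_step1.foldl
    (fun acc s => acc ++ [s.toList.foldl (fun sub c => sub ++ [((c.toNat : Int) - 97)]) []]) []
  let st := minCom_group_step2.toList.zipIdx.foldl (pvStep2A degree_2) ([], [])
  (results_step1, st.1)

-- ===== PORT B =====
def procesResults_alt (minCom_group_step1 : List String) (minCom_group_step2 : String) (degree_2 : Int) : List (List Int) × List (List Int) :=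
  let results_step1 := minCom_group_step1.map (fun g => g.toList.map (fun c => ((c.toNat : Int) - 97)))
  let ints := minCom_group_step2.toList.map (fun c => ((c.toNat : Int) - 48))
  let n := PySem.Int.floordiv (ints.length : Int) degree_2
  let results_step2 := (PySem.List.pyRange 0 n 1).map
    (fun k => PySem.List.slice ints (some (k * degree_2)) (some ((k + 1) * degree_2)))
  (results_step1, results_step2)

-- ===== PRECONDITION & SPEC =====
-- Pre_ excludes degree_2 = 0: there A raises ZeroDivisionError on every non-empty step-2 string
-- (returning only on the degenerate empty one), while B's floor division raises unconditionally.
def Pre_procesResults (minCom_group_step1 : List String) (minCom_group_step2 : String) (degree_2 : Int) : Prop := degree_2 ≠ 0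
instance (minCom_group_step1 : List String) (minCom_group_step2 : String) (degree_2 : Int) : Decidable (Pre_procesResults minCom_group_step1 minCom_group_step2 degree_2) := by unfold Pre_procesResults; infer_instance

def pvWitness_procesResults : List String × String × Int := (["ab"], "12345", 2)

def Spec_procesResults (minCom_group_step1 : List String) (minCom_group_step2 : String) (degree_2 : Int) (out : List (List Int) × List (List Int)) : Prop := out = procesResults_alt minCom_group_step1 minCom_group_step2 degree_2
instance (minCom_group_step1 : List String) (minCom_group_step2 : String) (degree_2 : Int) (out : List (List Int) × List (List Int)) : Decidable (Spec_procesResults minCom_group_step1 minCom_group_step2 degree_2 out) := by unfold Spec_procesResults; infer_instance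

-- ===== CLAIM (what is proved, stated in full; the proofs are below) =====
def Claim_equal_procesResults : Prop := ∀ (minCom_group_step1 : List String) (minCom_group_step2 : String) (degree_2 : Int), Dom_procesResults minCom_group_step1 minCom_group_step2 degree_2 → Pre_procesResults minCom_group_step1 minCom_group_step2 degree_2 → Spec_procesResults minCom_group_step1 minCom_group_step2 degree_2 (procesResults minCom_group_step1 minCom_group_step2 degree_2)

-- ===== LEMMAS AND PROOFS =====

-- chunking a list into its complete blocks of dn elements, dropping the trailing incomplete block
def pvChunks {α : Type} (dn : Nat) (xs : List α) : List (List α) :=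
  if _ : 0 < dn ∧ dn ≤ xs.length then
    xs.take dn :: pvChunks dn (xs.drop dn)
  else []
termination_by xs.length
decreasing_by simp; omega

lemma pv_foldl_app {α β : Type} (g : α → β) : ∀ (l : List α) (init : List β),
    l.foldl (fun acc s => acc ++ [g s]) init = init ++ l.map g := by
  intro l
  induction l with
  | nil => simp
  | cons x xs ih => intro init; simp [ih]

-- A's loop body never fires while no index hits the modulo condition: it only accumulates.
lemma pv_noHit (d : Int) : ∀ (xs : List Char) (n : Nat) (R : List (List Int)) (sub : List Int),
    (∀ k, k < xs.length → ¬ (PySem.Int.mod (((n + k : Nat)) : Int) d = d - 1)) →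
    (xs.zipIdx n).foldl (pvStep2A d) (R, sub) = (R, sub ++ xs.map (fun c => ((c.toNat : Int) - 48))) := by
  intro xs
  induction xs with
  | nil => intro n R sub _; simp
  | cons c cs ih =>
    intro n R sub h
    have h0 := h 0 (by simp)
    simp only [List.zipIdx_cons, List.foldl_cons]
    rw [show pvStep2A d (R, sub) (c, n) = (R, sub ++ [((c.toNat : Int) - 48)]) from by
      simp only [pvStep2A]; rw [if_neg (by simpa using h0)]]
    rw [ih (n+1) R _ (fun k hk => by
      have := h (k+1) (by simpa using hk)
      simpa [Nat.add_assoc, Nat.add_comm 1 k] using this)]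
    simp

-- one full block of dn characters, started at a multiple of dn, is emitted as one subgroup
lemma pv_chunkStep (dn : Nat) (hd : 0 < dn) :
    ∀ (ys : List Char) (q : Nat) (R : List (List Int)), ys.length = dn →
    (ys.zipIdx (q * dn)).foldl (pvStep2A (dn : Int)) (R, []) =
      (R ++ [ys.map (fun c => ((c.toNat : Int) - 48))], []) := by
  intro ys q R hlen
  rcases List.eq_nil_or_concat ys with h | ⟨zs, y, h⟩
  · subst h; simp at hlen; omega
  · subst h
    simp only [List.concat_eq_append] at hlen ⊢
    have hzs : zs.length = dn - 1 := by simp at hlen; omega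
    rw [List.zipIdx_append, List.foldl_append]
    rw [pv_noHit (dn : Int) zs (q * dn) R [] (fun k hk => by
      rw [PySem.Int.mod_natCast, show q * dn + k = k + q * dn from by omega, Nat.add_mul_mod_self_right]
      have hk' : k < dn - 1 := by omega
      rw [Nat.mod_eq_of_lt (by omega)]
      intro hcon
      omega)]
    simp only [List.zipIdx_cons, List.zipIdx_nil, List.foldl_cons, List.foldl_nil]
    have hidx : q * dn + zs.length = q * dn + (dn - 1) := by omega
    rw [hidx]
    have hcond : PySem.Int.mod (((q * dn + (dn - 1) : Nat)) : Int) (dn : Int) = (dn : Int) - 1 := by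
      rw [PySem.Int.mod_natCast, show q * dn + (dn - 1) = (dn - 1) + q * dn from by omega,
        Nat.add_mul_mod_self_right, Nat.mod_eq_of_lt (by omega)]
      omega
    simp only [pvStep2A]
    rw [if_pos (by simpa using hcond)]
    simp

-- A's whole second loop (positive degree) produces exactly the complete chunks
lemma pv_mainA (dn : Nat) (hd : 0 < dn) : ∀ (N : Nat) (xs : List Char), xs.length ≤ N →
    ∀ (R : List (List Int)) (q : Nat),
    ((xs.zipIdx (q * dn)).foldl (pvStep2A (dn : Int)) (R, [])).1 =
      R ++ pvChunks dn (xs.map (fun c => ((c.toNat : Int) - 48))) := by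
  intro N
  induction N with
  | zero =>
    intro xs hx R q
    have : xs = [] := List.eq_nil_of_length_eq_zero (by omega)
    subst this
    rw [pvChunks, dif_neg (by simp; omega)]
    simp
  | succ N ih =>
    intro xs hx R q
    by_cases hlen : xs.length < dn
    · rw [pv_noHit (dn : Int) xs (q * dn) R [] (fun k hk => by
        rw [PySem.Int.mod_natCast, show q * dn + k = k + q * dn from by omega,
          Nat.add_mul_mod_self_right, Nat.mod_eq_of_lt (by omega)]
        intro hcon; omega)]
      rw [pvChunks]
      rw [dif_neg (by simp; omega)]
      simp
    · rw [Nat.not_lt] at hlen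
      conv_lhs => rw [← List.take_append_drop dn xs]
      rw [List.zipIdx_append, List.foldl_append]
      rw [pv_chunkStep dn hd (xs.take dn) q R (by simp [List.length_take]; omega)]
      have ht : (List.take dn xs).length = dn := by
        rw [List.length_take]; omega
      have hsh : q * dn + (List.take dn xs).length = (q + 1) * dn := by
        rw [ht]; ring
      rw [hsh, ih (xs.drop dn) (by simp; omega) (R ++ [(xs.take dn).map (fun c => ((c.toNat : Int) - 48))]) (q + 1)]
      have hc : 0 < dn ∧ dn ≤ (xs.map (fun c => ((c.toNat : Int) - 48))).length := by
        simp; omega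
      conv_rhs => rw [pvChunks, dif_pos hc]
      simp [List.map_take, List.map_drop]

-- B's chunk-index comprehension produces the same complete chunks
lemma pv_chunksRange (dn : Nat) (hd : 0 < dn) : ∀ (N : Nat) (xs : List Int), xs.length ≤ N →
    (List.range (xs.length / dn)).map (fun k => (xs.drop (k * dn)).take dn) = pvChunks dn xs := by
  intro N
  induction N with
  | zero =>
    intro xs hx
    have : xs = [] := List.eq_nil_of_length_eq_zero (by omega)
    subst this
    rw [pvChunks, dif_neg (by simp; omega)]
    simp
  | succ N ih =>
    intro xs hx
    by_cases hlen : xs.length < dn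
    · rw [Nat.div_eq_of_lt hlen, pvChunks, dif_neg (by omega)]
      simp
    · rw [Nat.not_lt] at hlen
      rw [Nat.div_eq_sub_div hd hlen, List.range_succ_eq_map]
      conv_rhs => rw [pvChunks, dif_pos ⟨hd, hlen⟩]
      simp only [List.map_cons, List.map_map]
      congr 1
      · simp
      · rw [← ih (xs.drop dn) (by simp; omega)]
        simp only [List.length_drop]
        congr 1
        funext k
        simp only [Function.comp_apply, List.drop_drop]
        congr 2
        · rw [Nat.succ_mul]; omega

-- with a negative degree Python's modulo (sign of the divisor) can never equal degree-1
lemma pv_negNoHit (a d : Int) (hd : d < 0) : ¬ PySem.Int.mod a d = d - 1 := by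
  intro hcon
  simp only [PySem.Int.mod] at hcon
  rw [Int.fmod_eq_emod] at hcon
  have := Int.emod_nonneg a (show d ≠ 0 by omega)
  split_ifs at hcon <;> omega

lemma pv_fdiv_nonpos (a d : Int) (hd : d < 0) (ha : 0 ≤ a) : PySem.Int.floordiv a d ≤ 0 := by
  simp only [PySem.Int.floordiv]
  have hfm : a.fmod d ≤ 0 := by
    rw [Int.fmod_eq_emod]
    split_ifs with h
    · rcases h with h | h
      · omega
      · simp [Int.emod_eq_zero_of_dvd h]
    · have := Int.emod_lt_of_neg a hd; omega
  have h1 := Int.mul_fdiv_add_fmod a d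
  by_contra hc
  have h2 : d * a.fdiv d ≤ d * 1 → False := by intro h2; omega
  apply h2
  apply mul_le_mul_of_nonpos_left (by omega) (le_of_lt hd)

lemma pv_pyRange_nonpos (n : Int) (h : n ≤ 0) : PySem.List.pyRange 0 n 1 = [] := by
  simp [PySem.List.pyRange]; omega

-- ===== VERDICT (by name: the statement is the Claim_ definition above) =====
theorem procesResults_spec : Claim_equal_procesResults := by
  intro m1 s2 d _ hpre
  unfold Pre_procesResults at hpre
  unfold Spec_procesResults
  simp only [procesResults, procesResults_alt, Prod.mk.injEq]
  constructor
  · rw [pv_foldl_app]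
    simp only [List.nil_append]
    apply List.map_congr_left
    intro s _
    rw [pv_foldl_app]
    simp
  · rcases lt_or_gt_of_ne hpre with hneg | hpos
    · -- degree_2 < 0 : A emits nothing, B's range is empty
      rw [pv_noHit d s2.toList 0 [] [] (fun k _ => pv_negNoHit _ d hneg)]
      rw [pv_pyRange_nonpos _ (pv_fdiv_nonpos _ d hneg (by positivity))]
      simp
    · -- degree_2 > 0
      have hdd : d = ((d.toNat : Nat) : Int) := (Int.toNat_of_nonneg (by omega)).symm
      have hd : 0 < d.toNat := by omega
      rw [hdd]
      have hA := pv_mainA d.toNat hd s2.toList.length s2.toList le_rfl [] 0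
      rw [Nat.zero_mul] at hA
      rw [hA]
      have hflo : PySem.Int.floordiv (((s2.toList.map (fun c => ((c.toNat : Int) - 48))).length : Nat) : Int) ((d.toNat : Nat) : Int) = ((s2.toList.length / d.toNat : Nat) : Int) := by
        rw [List.length_map]; exact PySem.Int.floordiv_natCast _ _
      rw [hflo, PySem.List.pyRange_zero_natCast, List.map_map]
      have hB := pv_chunksRange d.toNat hd s2.toList.length (s2.toList.map (fun c => ((c.toNat : Int) - 48))) (by simp)
      rw [List.length_map] at hB
      rw [← hB]
      simp only [List.nil_append]
      apply List.map_congr_left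
      intro k _
      simp only [Function.comp_apply]
      rw [show ((k : Nat) : Int) * ((d.toNat : Nat) : Int) = ((k * d.toNat : Nat) : Int) from by push_cast; ring,
        show (((k : Nat) : Int) + 1) * ((d.toNat : Nat) : Int) = ((k * d.toNat + d.toNat : Nat) : Int) from by push_cast; ring,
        PySem.List.slice_natCast]
      congr 1
      omega
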